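-- pv_equiv track=rewrite | github.com/HilltopWorks/HilltopTranslationScripts | blue Legend of water/compress.py | __longestSubstringFinder
-- ===== SOURCE A (Python) =====
-- def __longestSubstringFinder(string1, string2):
--     answer = ""
--     len1, len2 = len(string1), len(string2)
--     for i in range(0,len1,2):
--         for j in range(0,len2,2):
--             lcs_temp=0
--             match=''
--             while ((i+lcs_temp < len1) and (j+lcs_temp<len2) and string1[i+lcs_temp] == string2[j+lcs_temp]):
--                 match += string2[j+lcs_temp]
--                 lcs_temp+=1
--             if (len(match) > len(answer)):
--                 answer = match
--
--     if len(answer)%2 == 1: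
--         answer = answer[:len(answer)-1]
--
--     return answer
-- ===== SOURCE B (Python) =====
-- def __longestSubstringFinder(string1, string2):
--     n, m = len(string1), len(string2)
--     # DP on common-extension lengths: nxt[j] = length of the longest common
--     # stretch of string1[i+1:] and string2[j:] starting exactly at (i+1, j).
--     nxt = [0] * (m + 1)
--     best_len, best_j = 0, 0
--     for i in range(n - 1, -1, -1):
--         cur = [0] * (m + 1)
--         for j in range(m - 1, -1, -1):
--             if string1[i] == string2[j]:
--                 cur[j] = nxt[j + 1] + 1
--         if i % 2 == 0:
--             row_len, row_j = 0, 0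
--             for j in range(0, m, 2):
--                 if cur[j] > row_len:
--                     row_len, row_j = cur[j], j
--             if row_len >= best_len:
--                 best_len, best_j = row_len, row_j
--         nxt = cur
--     best_len -= best_len % 2
--     return string2[best_j:best_j + best_len]
-- ===== Notes on version B (the rewrite author's own statement) =====
-- stated objective: faster
-- what changed: Replaced the per-(i,j) character-by-character rescan with a suffix DP on common-extension lengths (one row per i, computed from the bottom), tracking the best even-start match with the same smallest-i-then-smallest-j tie-break and slicing the answer out of string2 at the end.
import Mathlib
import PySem

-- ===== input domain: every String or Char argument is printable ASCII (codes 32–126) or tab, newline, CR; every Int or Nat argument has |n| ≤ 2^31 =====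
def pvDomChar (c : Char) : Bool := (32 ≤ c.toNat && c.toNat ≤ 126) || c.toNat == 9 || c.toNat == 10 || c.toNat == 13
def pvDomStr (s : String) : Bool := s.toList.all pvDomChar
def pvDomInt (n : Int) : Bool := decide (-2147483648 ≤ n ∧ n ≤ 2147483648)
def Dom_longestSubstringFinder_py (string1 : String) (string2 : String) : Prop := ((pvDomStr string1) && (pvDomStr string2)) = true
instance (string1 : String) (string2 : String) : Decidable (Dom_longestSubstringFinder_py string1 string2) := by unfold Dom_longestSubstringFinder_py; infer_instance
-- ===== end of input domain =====

-- B replaces A's per-(i,j) character rescans by a suffix DP on common-extension lengths (objective: faster).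

-- ===== PORT A =====
-- A's inner while loop: walks string1[i+k] / string2[j+k] while in range and equal, appending
-- string2's char; the obvious structural recursion on the two dropped suffixes (exact: the loop
-- stops at the first mismatch or when either index reaches its string's end).
def matchLoopA : List Char → List Char → List Char
  | x :: xs, y :: ys => if x == y then y :: matchLoopA xs ys else []
  | _, _ => []

def longestSubstringFinder_py (string1 : String) (string2 : String) : String :=
  let l1 := string1.toList
  let l2 := string2.toList
  let answer : List Char :=
    (PySem.List.pyRange 0 l1.length 2).foldl (fun ans i =>
      (PySem.List.pyRange 0 l2.length 2).foldl (fun ans j =>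
        if (matchLoopA (l1.drop i.toNat) (l2.drop j.toNat)).length > ans.length
        then matchLoopA (l1.drop i.toNat) (l2.drop j.toNat) else ans) ans) []
  -- answer[:len(answer)-1] with len(answer) ≥ 1 in this branch: a nonnegative in-range slice = take
  let answer2 := if answer.length % 2 == 1 then answer.take (answer.length - 1) else answer
  String.mk answer2

-- ===== PORT B =====
-- cur[j] = nxt[j+1] + 1 if string1[i] == string2[j] else 0, built by recursion over string2
-- (ns is the nxt row aligned so that nxt[j+1] = ns.tail.headD 0; headD 0 is Python's sentinel cell nxt[m]).
def rowB (c : Char) : List Char → List Nat → List Nat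
  | [], _ => []
  | y :: ys, ns => (if c == y then ns.tail.headD 0 + 1 else 0) :: rowB c ys ns.tail

-- the row scan `for j in range(0, m, 2): if cur[j] > row_len: row_len, row_j = cur[j], j`
-- (cur[j] is an in-range index in Python; getD is exact there)
def rowScanB (cur : List Nat) (m : Nat) : Nat × Nat :=
  (PySem.List.pyRange 0 m 2).foldl
    (fun p j => if cur.getD j.toNat 0 > p.1 then (cur.getD j.toNat 0, j.toNat) else p) (0, 0)

-- the loop `for i in range(n-1, -1, -1)`: rows for larger i are computed first (the recursive
-- call), then row i is built and, when i is even, scanned; state = (nxt, best_len, best_j)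
def loopB (l2 : List Char) (m : Nat) : List Char → Nat → (List Nat × Nat × Nat)
  | [], _ => (List.replicate m 0, 0, 0)
  | c :: rest, i =>
    let r := loopB l2 m rest (i + 1)
    let cur := rowB c l2 r.1
    if i % 2 == 0 then
      let rs := rowScanB cur m
      if rs.1 ≥ r.2.1 then (cur, rs.1, rs.2) else (cur, r.2.1, r.2.2)
    else (cur, r.2.1, r.2.2)

def longestSubstringFinder_py_alt (string1 : String) (string2 : String) : String :=
  let l1 := string1.toList
  let l2 := string2.toList
  let r := loopB l2 l2.length l1 0
  -- string2[best_j : best_j + (best_len - best_len % 2)]: a nonnegative in-range slice = drop/take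
  String.mk ((l2.drop r.2.2).take (r.2.1 - r.2.1 % 2))

-- ===== PRECONDITION & SPEC =====
def Spec_longestSubstringFinder_py (string1 : String) (string2 : String) (out : String) : Prop := out = longestSubstringFinder_py_alt string1 string2
instance (string1 : String) (string2 : String) (out : String) : Decidable (Spec_longestSubstringFinder_py string1 string2 out) := by unfold Spec_longestSubstringFinder_py; infer_instance

-- ===== CLAIM (what is proved, stated in full; the proofs are below) =====
def Claim_equal_longestSubstringFinder_py : Prop := ∀ (string1 : String) (string2 : String), Dom_longestSubstringFinder_py string1 string2 → Spec_longestSubstringFinder_py string1 string2 (longestSubstringFinder_py string1 string2)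

-- ===== LEMMAS AND PROOFS =====

-- common-prefix length of two char lists
def cpl : List Char → List Char → Nat
  | x :: xs, y :: ys => if x == y then cpl xs ys + 1 else 0
  | _, _ => 0

-- row of extension lengths: extRow l1 l2 = [cpl l1 (l2.drop j) | j < l2.length]
def extRow (l1 : List Char) : List Char → List Nat
  | [] => []
  | y :: ys => cpl l1 (y :: ys) :: extRow l1 ys

-- "keep the first strict maximum" machinery on (value, start-index) pairs
def stepP (p q : Nat × Nat) : Nat × Nat := if q.1 > p.1 then q else p
def bestRow (r : List (Nat × Nat)) : Nat × Nat := r.foldl stepP (0, 0)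
def combR (r : List (Nat × Nat)) (acc : Nat × Nat) : Nat × Nat :=
  if (bestRow r).1 ≥ acc.1 then bestRow r else acc
def bestRows (rows : List (List (Nat × Nat))) : Nat × Nat := rows.foldr combR (0, 0)

def evens (n : Nat) : List Nat := (List.range n).filter (fun k => k % 2 == 0)

def rowOf (l2 l : List Char) : List (Nat × Nat) :=
  (evens l2.length).map (fun j => (cpl l (l2.drop j), j))

def rowsOf (l2 : List Char) : List Char → Nat → List (List (Nat × Nat))
  | [], _ => []
  | c :: rest, i => (if i % 2 == 0 then [rowOf l2 (c :: rest)] else []) ++ rowsOf l2 rest (i + 1)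

def renderP (l2 : List Char) (p : Nat × Nat) : List Char := (l2.drop p.2).take p.1

theorem cpl_nil_right (a : List Char) : cpl a [] = 0 := by cases a <;> rfl

theorem cpl_le (a b : List Char) : cpl a b ≤ b.length := by
  induction a generalizing b with
  | nil => cases b <;> simp [cpl]
  | cons x xs ih =>
    cases b with
    | nil => simp [cpl]
    | cons y ys =>
      simp only [cpl, List.length_cons]
      split
      · exact Nat.succ_le_succ (ih ys)
      · omega

theorem matchLoopA_eq (a b : List Char) : matchLoopA a b = b.take (cpl a b) := by
  induction a generalizing b with
  | nil => cases b <;> simp [matchLoopA, cpl]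
  | cons x xs ih =>
    cases b with
    | nil => simp [matchLoopA, cpl]
    | cons y ys =>
      simp only [matchLoopA, cpl]
      split
      · simp [ih]
      · simp

theorem length_renderP_cpl (a l2 : List Char) (j : Nat) :
    (renderP l2 (cpl a (l2.drop j), j)).length = cpl a (l2.drop j) := by
  simp [renderP]
  simpa using cpl_le a (l2.drop j)

theorem extRow_getD (l1 l2 : List Char) (j : Nat) :
    (extRow l1 l2)[j]?.getD 0 = cpl l1 (l2.drop j) := by
  induction l2 generalizing j with
  | nil => simp [extRow, cpl_nil_right]
  | cons y ys ih =>
    cases j with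
    | zero => simp [extRow]
    | succ j => simpa [extRow] using ih j

theorem headD_extRow (l1 ys : List Char) : (extRow l1 ys).headD 0 = cpl l1 ys := by
  cases ys with
  | nil => simp [extRow, cpl_nil_right]
  | cons y ys => simp [extRow]

theorem rowB_extRow (c : Char) (l1 l2 : List Char) :
    rowB c l2 (extRow l1 l2) = extRow (c :: l1) l2 := by
  induction l2 with
  | nil => rfl
  | cons y ys ih =>
    simp only [rowB, extRow, List.tail_cons, headD_extRow, ih, cpl]

theorem replicate_eq_extRow (l2 : List Char) :
    List.replicate l2.length (0 : Nat) = extRow [] l2 := by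
  induction l2 with
  | nil => rfl
  | cons y ys ih => simp [extRow, cpl, List.replicate, ih]

theorem foldl_stepP_absorb (r : List (Nat × Nat)) :
    ∀ p, r.foldl stepP p = if (bestRow r).1 > p.1 then bestRow r else p := by
  induction r with
  | nil => intro p; simp [bestRow, List.foldl_nil]
  | cons x xs ih =>
    intro p
    have hb : bestRow (x :: xs) =
        if (bestRow xs).1 > (stepP (0, 0) x).1 then bestRow xs else stepP (0, 0) x := by
      simpa [bestRow, List.foldl_cons] using ih (stepP (0, 0) x)
    simp only [List.foldl_cons, ih (stepP p x), hb]
    unfold stepP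
    split_ifs <;> first | rfl | omega

theorem foldl_stepP_triv (r : List (Nat × Nat)) :
    ∀ p, r.foldl stepP p = p ∨ 0 < (r.foldl stepP p).1 := by
  induction r with
  | nil => intro p; exact Or.inl rfl
  | cons x xs ih =>
    intro p
    rcases ih (stepP p x) with h | h
    · rw [List.foldl_cons, h]
      unfold stepP
      split_ifs with hx
      · exact Or.inr (by omega)
      · exact Or.inl rfl
    · exact Or.inr (by simpa [List.foldl_cons] using h)

theorem bestRow_cases (r : List (Nat × Nat)) : bestRow r = (0, 0) ∨ 0 < (bestRow r).1 :=
  foldl_stepP_triv r (0, 0)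

theorem bestRows_cases (rows : List (List (Nat × Nat))) :
    bestRows rows = (0, 0) ∨ 0 < (bestRows rows).1 := by
  induction rows with
  | nil => exact Or.inl rfl
  | cons r rs ih =>
    simp only [bestRows, List.foldr_cons]
    unfold combR
    split_ifs with h
    · exact bestRow_cases r
    · simpa [bestRows] using ih

theorem foldl_stepP_flatten (rows : List (List (Nat × Nat))) :
    ∀ p, rows.flatten.foldl stepP p = if (bestRows rows).1 > p.1 then bestRows rows else p := by
  induction rows with
  | nil => intro p; simp [bestRows]
  | cons r rs ih =>
    intro p
    have h1 : (r :: rs).flatten = r ++ rs.flatten := rfl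
    rw [h1, List.foldl_append, ih, foldl_stepP_absorb]
    have h2 : bestRows (r :: rs) = combR r (bestRows rs) := rfl
    rw [h2]
    unfold combR
    split_ifs <;> first | rfl | omega

theorem foldl_stepP_flatten_zero (rows : List (List (Nat × Nat))) :
    rows.flatten.foldl stepP (0, 0) = bestRows rows := by
  rw [foldl_stepP_flatten]
  rcases bestRows_cases rows with h | h
  · simp [h]
  · simp [if_pos h]

theorem filter_even_range (n : Nat) :
    (List.range n).filter (fun k => k % 2 == 0) = (List.range ((n + 1) / 2)).map (fun k => 2 * k) := by
  induction n with
  | zero => rfl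
  | succ n ih =>
    rw [List.range_succ, List.filter_append, ih]
    by_cases h : n % 2 = 0
    · have h2 : (n + 1 + 1) / 2 = (n + 1) / 2 + 1 := by omega
      have h3 : 2 * ((n + 1) / 2) = n := by omega
      rw [h2, List.range_succ, List.map_append]
      simp [h, h3]
    · have h2 : (n + 1 + 1) / 2 = (n + 1) / 2 := by omega
      have h4 : ¬ (n % 2 == 0) = true := by simpa using h
      rw [h2]
      simp [List.filter, h4]

theorem pyRange_zero_two (n : Nat) :
    PySem.List.pyRange 0 (n : Int) 2 = (evens n).map (fun (j : Nat) => (j : Int)) := by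
  rw [PySem.List.pyRange_of_pos 0 (n : Int) (by norm_num)]
  unfold evens
  rw [filter_even_range, List.map_map]
  have hN : (if (0 : Int) < (n : Int) then (((n : Int) - 0 + 2 - 1) / 2).toNat else 0) = (n + 1) / 2 := by
    split_ifs <;> omega
  rw [hN]
  apply List.map_congr_left
  intro k _
  simp only [Function.comp]
  push_cast
  ring

theorem rowScanB_eq (l l2 : List Char) :
    rowScanB (extRow l l2) l2.length = bestRow (rowOf l2 l) := by
  unfold rowScanB rowOf bestRow
  rw [pyRange_zero_two, List.foldl_map, List.foldl_map]
  apply List.foldl_ext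
  intro p j _
  simp [Int.toNat_natCast, extRow_getD, stepP]

theorem loopB_spec (l2 : List Char) :
    ∀ (l : List Char) (i : Nat),
      loopB l2 l2.length l i = (extRow l l2, bestRows (rowsOf l2 l i)) := by
  intro l
  induction l with
  | nil => intro i; simp [loopB, rowsOf, bestRows, replicate_eq_extRow]
  | cons c rest ih =>
    intro i
    simp only [loopB, ih (i + 1), rowB_extRow, rowScanB_eq]
    by_cases h : i % 2 = 0
    · have h4 : (i % 2 == 0) = true := by simp [h]
      rw [if_pos h4]
      rw [show rowsOf l2 (c :: rest) i = rowOf l2 (c :: rest) :: rowsOf l2 rest (i + 1) by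
        simp [rowsOf, h4]]
      rw [show bestRows (rowOf l2 (c :: rest) :: rowsOf l2 rest (i + 1)) =
          combR (rowOf l2 (c :: rest)) (bestRows (rowsOf l2 rest (i + 1))) from rfl]
      unfold combR
      split_ifs <;> rfl
    · have h4 : ¬ (i % 2 == 0) = true := by simpa using h
      rw [if_neg h4]
      rw [show rowsOf l2 (c :: rest) i = rowsOf l2 rest (i + 1) by simp [rowsOf, h4]]

theorem rowsOf_eq (l2 : List Char) :
    ∀ (l : List Char) (i : Nat),
      rowsOf l2 l i =
        ((List.range l.length).filter (fun k => (i + k) % 2 == 0)).map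
          (fun k => rowOf l2 (l.drop k)) := by
  intro l
  induction l with
  | nil => intro i; rfl
  | cons c rest ih =>
    intro i
    have hmapfilter :
        List.filter (fun k => (i + k) % 2 == 0) (List.map Nat.succ (List.range rest.length))
          = List.map Nat.succ (List.filter (fun k => ((i + 1) + k) % 2 == 0) (List.range rest.length)) := by
      rw [List.filter_map]
      congr 1
      apply List.filter_congr
      intro k _
      simp only [Function.comp]
      have hk : i + Nat.succ k = (i + 1) + k := by omega
      rw [hk]
    rw [List.length_cons, List.range_succ_eq_map, List.filter_cons]
    simp only [rowsOf, ih (i + 1)]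
    by_cases h : i % 2 = 0
    · have h4 : (i % 2 == 0) = true := by simp [h]
      have h0 : ((i + 0) % 2 == 0) = true := by simpa using h
      rw [if_pos h4, if_pos h0, hmapfilter]
      simp only [List.map_cons, List.map_map, List.singleton_append, List.drop_zero]
      refine congrArg₂ List.cons rfl ?_
      apply List.map_congr_left
      intro k _
      simp [Function.comp]
    · have h4 : ¬ (i % 2 == 0) = true := by simpa using h
      have h0 : ¬ ((i + 0) % 2 == 0) = true := by simpa using h
      rw [if_neg h4, if_neg h0, hmapfilter]
      simp only [List.map_map, List.nil_append]
      apply List.map_congr_left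
      intro k _
      simp [Function.comp, List.drop_succ_cons]

theorem A_row (l1' l2 : List Char) :
    ∀ (js : List Nat) (p : Nat × Nat), (renderP l2 p).length = p.1 →
      (js.map (fun (j : Nat) => (j : Int))).foldl (fun ans j =>
          if (matchLoopA l1' (l2.drop j.toNat)).length > ans.length
          then matchLoopA l1' (l2.drop j.toNat) else ans) (renderP l2 p)
        = renderP l2 ((js.map (fun j => (cpl l1' (l2.drop j), j))).foldl stepP p)
      ∧ (renderP l2 ((js.map (fun j => (cpl l1' (l2.drop j), j))).foldl stepP p)).length
          = ((js.map (fun j => (cpl l1' (l2.drop j), j))).foldl stepP p).1 := by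
  intro js
  induction js with
  | nil => intro p h; exact ⟨rfl, h⟩
  | cons j js ih =>
    intro p h
    have hm : matchLoopA l1' (l2.drop ((j : Int)).toNat) = renderP l2 (cpl l1' (l2.drop j), j) := by
      rw [Int.toNat_natCast, matchLoopA_eq]; rfl
    have hml : (renderP l2 (cpl l1' (l2.drop j), j)).length = cpl l1' (l2.drop j) :=
      length_renderP_cpl l1' l2 j
    simp only [List.map_cons, List.foldl_cons, hm, hml, h]
    have hstep : (if cpl l1' (l2.drop j) > p.1
        then renderP l2 (cpl l1' (l2.drop j), j) else renderP l2 p)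
        = renderP l2 (stepP p (cpl l1' (l2.drop j), j)) := by
      unfold stepP; split_ifs <;> rfl
    have hlen : (renderP l2 (stepP p (cpl l1' (l2.drop j), j))).length
        = (stepP p (cpl l1' (l2.drop j), j)).1 := by
      unfold stepP; split_ifs
      · exact hml
      · exact h
    rw [hstep]
    exact ih (stepP p (cpl l1' (l2.drop j), j)) hlen

theorem A_outer (l1 l2 : List Char) :
    ∀ (is : List Nat) (p : Nat × Nat), (renderP l2 p).length = p.1 →
      is.foldl (fun ans i =>
          (PySem.List.pyRange 0 (l2.length : Int) 2).foldl (fun ans j =>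
            if (matchLoopA (l1.drop i) (l2.drop j.toNat)).length > ans.length
            then matchLoopA (l1.drop i) (l2.drop j.toNat) else ans) ans) (renderP l2 p)
        = renderP l2 ((is.map (fun i => rowOf l2 (l1.drop i))).flatten.foldl stepP p)
      ∧ (renderP l2 ((is.map (fun i => rowOf l2 (l1.drop i))).flatten.foldl stepP p)).length
          = ((is.map (fun i => rowOf l2 (l1.drop i))).flatten.foldl stepP p).1 := by
  intro is
  induction is with
  | nil => intro p h; exact ⟨rfl, h⟩
  | cons i is ih =>
    intro p h
    have hrow := A_row (l1.drop i) l2 (evens l2.length) p h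
    rw [List.foldl_cons]
    have hpy : (PySem.List.pyRange 0 (l2.length : Int) 2).foldl (fun ans j =>
            if (matchLoopA (l1.drop i) (l2.drop j.toNat)).length > ans.length
            then matchLoopA (l1.drop i) (l2.drop j.toNat) else ans) (renderP l2 p)
        = renderP l2 ((rowOf l2 (l1.drop i)).foldl stepP p) := by
      rw [pyRange_zero_two]
      exact hrow.1
    have hlen1 : (renderP l2 ((rowOf l2 (l1.drop i)).foldl stepP p)).length
        = ((rowOf l2 (l1.drop i)).foldl stepP p).1 := hrow.2
    rw [hpy]
    have := ih ((rowOf l2 (l1.drop i)).foldl stepP p) hlen1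
    simpa [List.foldl_append] using this

-- ===== VERDICT (by name: the statement is the Claim_ definition above) =====
theorem longestSubstringFinder_py_spec : Claim_equal_longestSubstringFinder_py := by
  intro s1 s2 _
  unfold Spec_longestSubstringFinder_py
  show longestSubstringFinder_py s1 s2 = longestSubstringFinder_py_alt s1 s2
  simp only [longestSubstringFinder_py, longestSubstringFinder_py_alt]
  rw [loopB_spec]
  rw [pyRange_zero_two s1.toList.length]
  simp only [List.foldl_map, Int.toNat_natCast]
  have h0 : (renderP s2.toList ((0, 0) : Nat × Nat)).length = (0 : Nat) := rfl
  have hA := A_outer s1.toList s2.toList (evens s1.toList.length) (0, 0) h0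
  rw [show ([] : List Char) = renderP s2.toList (0, 0) from rfl]
  rw [hA.1]
  have hlen0 := hA.2
  have hG : ((evens s1.toList.length).map (fun i => rowOf s2.toList (s1.toList.drop i))).flatten.foldl stepP ((0, 0) : Nat × Nat)
      = bestRows (rowsOf s2.toList s1.toList 0) := by
    rw [foldl_stepP_flatten_zero]
    congr 1
    rw [rowsOf_eq]
    have hpred : (fun k => (0 + k) % 2 == 0) = (fun k : Nat => k % 2 == 0) := by
      funext k; simp
    rw [hpred]
    rfl
  rw [hG] at hA hlen0 ⊢
  set G := bestRows (rowsOf s2.toList s1.toList 0) with hGdef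
  rw [hlen0]
  unfold renderP
  congr 1
  by_cases hp : G.1 % 2 = 1
  · rw [if_pos (by simpa using hp), List.take_take]
    have h1 : min (G.1 - 1) G.1 = G.1 - 1 := by omega
    have h2 : G.1 - G.1 % 2 = G.1 - 1 := by omega
    rw [h1, h2]
  · rw [if_neg (by simpa using hp)]
    have h2 : G.1 - G.1 % 2 = G.1 := by omega
    rw [h2]
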